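-- pv_equiv track=rewrite | github.com/EpitechMirror/Zappy | ai/src/main_ai.py | parse_look_result
-- ===== SOURCE A (Python) =====
-- from typing import List, Dict, Any
--
-- def parse_look_result(result: str) -> List[List[str]]:
--     """Parse the look command result"""
--     content = result.strip("[]")
--     tiles = []
--     current_tile = []
--
--     i = 0
--     while i < len(content):
--         if content[i] == ",":
--             tiles.append(current_tile)
--             current_tile = []
--             i += 1
--             if i < len(content) and content[i] == " ":
--                 i += 1
--         else:
--             end = i
--             while end < len(content) and content[end] != ",":
--                 end += 1
--
--             tile_content = content[i:end].strip()
--             if tile_content: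
--                 current_tile = tile_content.split()
--             else:
--                 current_tile = []
--             i = end
--
--     if current_tile or i == len(content):
--         tiles.append(current_tile)
--
--     return tiles
-- ===== SOURCE B (Python) =====
-- from typing import List
--
-- def parse_look_result(result: str) -> List[List[str]]:
--     """Parse the look command result (split-based re-implementation)"""
--     content = result.strip("[]")
--     return [seg.strip().split() for seg in content.split(",")]
-- ===== Notes on version B (the rewrite author's own statement) =====
-- stated objective: simpler
-- what changed: Replaced the index-based character scanner with explicit tile/index state by a two-phase split (str.split on comma, then per-segment strip().split()); the manual inner comma-scan, the skip-one-space step and the final conditional append all disappear.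
import Mathlib
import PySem

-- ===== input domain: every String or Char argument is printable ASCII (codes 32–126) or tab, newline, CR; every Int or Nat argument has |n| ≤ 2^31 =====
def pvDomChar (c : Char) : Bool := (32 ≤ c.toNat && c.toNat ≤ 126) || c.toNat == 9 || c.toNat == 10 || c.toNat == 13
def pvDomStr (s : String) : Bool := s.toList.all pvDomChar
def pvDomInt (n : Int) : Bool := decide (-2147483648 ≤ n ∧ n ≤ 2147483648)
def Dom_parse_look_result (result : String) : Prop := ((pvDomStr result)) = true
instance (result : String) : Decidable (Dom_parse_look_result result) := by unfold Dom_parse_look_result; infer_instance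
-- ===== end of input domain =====

-- B replaces A's hand-written index scanner by content.split(",") followed by per-segment strip().split(): simpler, same O(n) cost; return value only, no mutation.

-- ===== PORT A =====
-- termination facts for the loop (cited by pvGoA's decreasing_by)
theorem pvSkipLen (rest : List Char) :
    (if rest.head? = some ' ' then rest.tail else rest).length ≤ rest.length := by
  split <;> (cases rest <;> simp)

theorem pvDropLen (c : Char) (rest : List Char) (h : ¬ c = ',') :
    ((c :: rest).dropWhile (· ≠ ',')).length ≤ rest.length := by
  rw [List.dropWhile_cons]
  simp only [h, decide_not, ne_eq, not_false_eq_true, decide_true, if_true]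
  exact List.length_dropWhile_le _ _

-- A's while-loop over the index i, carried as recursion on the remaining suffix of content;
-- tiles and current_tile are the same accumulators as in the Python.
def pvGoA : List Char → List (List String) → List String → List (List String)
  | [], tiles, cur =>
      -- loop exit: i = len(content), so `if current_tile or i == len(content)` always appends
      tiles ++ [cur]
  | c :: rest, tiles, cur =>
      if c = ',' then
        -- tiles.append(current_tile); current_tile = []; i += 1;
        -- `if i < len(content) and content[i] == " ": i += 1`
        pvGoA (if rest.head? = some ' ' then rest.tail else rest) (tiles ++ [cur]) []
      else
        -- inner while: end scans to the next ',' ⇒ content[i:end] = takeWhile (· ≠ ',')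
        let seg := (c :: rest).takeWhile (· ≠ ',')
        let tc := PySem.Chars.strip seg
        let cur' := if tc.isEmpty then ([] : List String)
                    else (PySem.Chars.split₀ tc).map (fun w => String.ofList w)
        pvGoA ((c :: rest).dropWhile (· ≠ ',')) tiles cur'
termination_by cs _ _ => cs.length
decreasing_by
  · simp only [List.length_cons]; exact Nat.lt_succ_of_le (pvSkipLen rest)
  · simp only [List.length_cons]
    exact Nat.lt_succ_of_le (pvDropLen c rest (by assumption))

def parse_look_result (result : String) : List (List String) :=
  pvGoA (PySem.Chars.stripChars result.toList ['[', ']']) [] []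

-- ===== PORT B =====
def parse_look_result_alt (result : String) : List (List String) :=
  (PySem.Chars.splitOn (PySem.Chars.stripChars result.toList ['[', ']']) [',']).map
    (fun seg => (PySem.Chars.split₀ (PySem.Chars.strip seg)).map (fun w => String.ofList w))

-- ===== PRECONDITION & SPEC =====
def Spec_parse_look_result (result : String) (out : List (List String)) : Prop := out = parse_look_result_alt result
instance (result : String) (out : List (List String)) : Decidable (Spec_parse_look_result result out) := by unfold Spec_parse_look_result; infer_instance

-- ===== CLAIM (what is proved, stated in full; the proofs are below) =====
def Claim_equal_parse_look_result : Prop := ∀ (result : String), Dom_parse_look_result result → Spec_parse_look_result result (parse_look_result result)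

-- ===== LEMMAS AND PROOFS =====

-- simple reference splitter: split a char list on ','
def pvMySplit : List Char → List (List Char)
  | [] => [[]]
  | c :: r =>
      if c = ',' then [] :: pvMySplit r
      else match pvMySplit r with
        | s :: t => (c :: s) :: t
        | [] => [[c]]

def pvConsFirst (x : List Char) : List (List Char) → List (List Char)
  | s :: t => (x ++ s) :: t
  | [] => [x]

-- the tile produced from one comma-segment
def pvW (seg : List Char) : List String :=
  (PySem.Chars.split₀ (PySem.Chars.strip seg)).map (fun w => String.ofList w)

theorem pvGoA_nil (tiles : List (List String)) (cur : List String) :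
    pvGoA [] tiles cur = tiles ++ [cur] := by simp only [pvGoA]

theorem pvGoA_comma (rest : List Char) (tiles : List (List String)) (cur : List String) :
    pvGoA (',' :: rest) tiles cur
      = pvGoA (if rest.head? = some ' ' then rest.tail else rest) (tiles ++ [cur]) [] := by
  conv_lhs => rw [pvGoA.eq_def]
  dsimp only
  rw [if_pos rfl]

theorem pvGoA_seg (c : Char) (rest : List Char) (tiles : List (List String)) (cur : List String)
    (h : ¬ c = ',') :
    pvGoA (c :: rest) tiles cur
      = pvGoA ((c :: rest).dropWhile (· ≠ ','))
          tiles
          (if (PySem.Chars.strip ((c :: rest).takeWhile (· ≠ ','))).isEmpty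
           then ([] : List String)
           else (PySem.Chars.split₀
                  (PySem.Chars.strip ((c :: rest).takeWhile (· ≠ ',')))).map
                  (fun w => String.ofList w)) := by
  conv_lhs => rw [pvGoA.eq_def]
  dsimp only
  rw [if_neg h]

theorem pvMySplit_ne_nil (cs : List Char) : pvMySplit cs ≠ [] := by
  cases cs with
  | nil => simp [pvMySplit]
  | cons c r =>
    simp only [pvMySplit]
    split
    · simp
    · split <;> simp_all

theorem pvMySplit_cons_ne (c : Char) (r : List Char) (h : ¬ c = ',') :
    pvMySplit (c :: r) = pvConsFirst [c] (pvMySplit r) := by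
  simp only [pvMySplit, if_neg h]
  cases h' : pvMySplit r with
  | nil => exact absurd h' (pvMySplit_ne_nil r)
  | cons s t => simp [pvConsFirst]

theorem pvConsFirst_append (x y : List Char) (ss : List (List Char)) :
    pvConsFirst (x ++ y) ss = pvConsFirst x (pvConsFirst y ss) := by
  cases ss <;> simp [pvConsFirst]

theorem pvGo_eq (l : List Char) :
    ∀ (fuel : Nat) (cur : List Char) (acc : List (List Char)),
    l.length < fuel →
    PySem.Chars.splitOn.go [','] fuel l cur acc
      = acc.reverse ++ pvConsFirst cur.reverse (pvMySplit l) := by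
  induction l with
  | nil =>
    intro fuel cur acc h
    match fuel with
    | f + 1 => simp [PySem.Chars.splitOn.go, pvMySplit, pvConsFirst]
  | cons c r ih =>
    intro fuel cur acc h
    match fuel with
    | f + 1 =>
      have hcount : r.length < f := by simp at h; omega
      by_cases hc : c = ','
      · subst hc
        have hpre : [','].isPrefixOf (',' :: r) = true := by simp [List.isPrefixOf]
        rw [PySem.Chars.splitOn.go, if_pos hpre]
        rw [show List.drop [','].length (',' :: r) = r by simp]
        rw [ih f [] (cur.reverse :: acc) hcount]
        rw [show pvMySplit (',' :: r) = [] :: pvMySplit r from by simp [pvMySplit]]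
        cases h' : pvMySplit r with
        | nil => exact absurd h' (pvMySplit_ne_nil r)
        | cons s t => simp [pvConsFirst]
      · have hpre : [','].isPrefixOf (c :: r) = false := by
          simp [List.isPrefixOf]; exact fun h' => hc h'.symm
        rw [PySem.Chars.splitOn.go, if_neg (by simp [hpre])]
        rw [ih f (c :: cur) acc hcount]
        rw [pvMySplit_cons_ne c r hc]
        simp [pvConsFirst_append]

theorem pvSplitOn_eq (cs : List Char) :
    PySem.Chars.splitOn cs [','] = pvMySplit cs := by
  unfold PySem.Chars.splitOn
  rw [pvGo_eq cs (cs.length + 1) [] [] (Nat.lt_succ_self _)]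
  cases h' : pvMySplit cs with
  | nil => exact absurd h' (pvMySplit_ne_nil cs)
  | cons s t => simp [pvConsFirst]

-- the leading space A skips after a comma is removed by strip() anyway
theorem pvW_space (s : List Char) : pvW (' ' :: s) = pvW s := by
  simp [pvW, PySem.Chars.strip, PySem.Chars.lstrip,
        show PySem.Chars.isspace ' ' = true from by decide]

theorem pvMap_w_space (r : List Char) :
    (pvMySplit (' ' :: r)).map pvW = (pvMySplit r).map pvW := by
  rw [pvMySplit_cons_ne ' ' r (by decide)]
  cases h' : pvMySplit r with
  | nil => exact absurd h' (pvMySplit_ne_nil r)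
  | cons s t => simp [pvConsFirst, pvW_space]

theorem pvW_nil : pvW [] = [] := by decide

-- A's current_tile for one segment equals pvW of the segment
theorem pvCur_eq (seg : List Char) :
    (if (PySem.Chars.strip seg).isEmpty then ([] : List String)
     else (PySem.Chars.split₀ (PySem.Chars.strip seg)).map (fun w => String.ofList w)) = pvW seg := by
  by_cases h : (PySem.Chars.strip seg).isEmpty
  · rw [if_pos h]
    rw [List.isEmpty_iff] at h
    simp [pvW, h, show PySem.Chars.split₀ ([] : List Char) = [] from by decide]
  · rw [if_neg h]; rfl

-- span of pvMySplit: splitting off the first comma-free segment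
theorem pvMySplit_span (cs : List Char) :
    pvMySplit cs =
      match cs.dropWhile (· ≠ ',') with
      | [] => [cs.takeWhile (· ≠ ',')]
      | _ :: r => cs.takeWhile (· ≠ ',') :: pvMySplit r := by
  induction cs with
  | nil => simp [pvMySplit]
  | cons c r ih =>
    by_cases hc : c = ','
    · subst hc
      simp [pvMySplit]
    · rw [pvMySplit_cons_ne c r hc]
      rw [List.dropWhile_cons, List.takeWhile_cons]
      have hd : (decide (c ≠ ',')) = true := by simp [hc]
      rw [hd]
      simp only [if_true]
      rw [ih]
      cases h' : r.dropWhile (· ≠ ',') with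
      | nil => simp [pvConsFirst]
      | cons d t => simp [pvConsFirst]

-- dropWhile (· ≠ ',') is empty or starts with ','
theorem pvDropWhile_head (cs : List Char) :
    cs.dropWhile (· ≠ ',') = [] ∨ ∃ r, cs.dropWhile (· ≠ ',') = ',' :: r := by
  induction cs with
  | nil => left; rfl
  | cons c r ih =>
    by_cases hc : c = ','
    · subst hc; right; exact ⟨r, by simp⟩
    · rw [List.dropWhile_cons]
      have hd : (decide (c ≠ ',')) = true := by simp [hc]
      rw [hd]
      simpa using ih

-- after a comma A continues with cur = [] on the (possibly space-skipped) rest;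
-- the produced tail of tiles is the mapped split of the unskipped rest
theorem pvGoA_eq (n : Nat) : ∀ (cs : List Char), cs.length ≤ n →
    ∀ (tiles : List (List String)),
    pvGoA cs tiles [] = tiles ++ (pvMySplit cs).map pvW := by
  induction n with
  | zero =>
    intro cs h tiles
    have : cs = [] := List.length_eq_zero_iff.mp (Nat.le_zero.mp h)
    subst this
    simp [pvGoA_nil, pvMySplit, pvW_nil]
  | succ n ih =>
    intro cs hlen tiles
    cases cs with
    | nil => simp [pvGoA_nil, pvMySplit, pvW_nil]
    | cons c rest =>
      by_cases hc : c = ','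
      · subst hc
        rw [pvGoA_comma]
        rw [show pvMySplit (',' :: rest) = [] :: pvMySplit rest from by simp [pvMySplit]]
        by_cases hsp : rest.head? = some ' '
        · rw [if_pos hsp]
          obtain ⟨r, hr⟩ : ∃ r, rest = ' ' :: r := by
            cases rest with
            | nil => simp at hsp
            | cons d r => simp at hsp; exact ⟨r, by rw [hsp]⟩
          subst hr
          rw [ih _ (by simp at hlen ⊢; omega) (tiles ++ [[]])]
          rw [show (' ' :: r).tail = r from rfl, ← pvMap_w_space r]
          simp [pvW_nil]
        · rw [if_neg hsp]
          rw [ih rest (by simp at hlen; omega) (tiles ++ [[]])]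
          simp [pvW_nil]
      · rw [pvGoA_seg c rest tiles [] hc, pvCur_eq]
        rw [pvMySplit_span (c :: rest)]
        rcases pvDropWhile_head (c :: rest) with h0 | ⟨r, hr⟩
        · rw [h0, pvGoA_nil]
          simp
        · rw [hr]
          have hr_len : r.length + 1 ≤ (c :: rest).length := by
            have := List.length_dropWhile_le (fun x => decide (x ≠ ',')) (c :: rest)
            rw [show (c :: rest).dropWhile (fun x => decide (x ≠ ',')) = ',' :: r from hr] at this
            simpa using this
          rw [pvGoA_comma]
          by_cases hsp : r.head? = some ' '
          · rw [if_pos hsp]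
            obtain ⟨r2, hr2⟩ : ∃ r2, r = ' ' :: r2 := by
              cases r with
              | nil => simp at hsp
              | cons d r2 => simp at hsp; exact ⟨r2, by rw [hsp]⟩
            subst hr2
            rw [show (' ' :: r2).tail = r2 from rfl]
            rw [ih r2 (by simp at hlen hr_len ⊢; omega) _]
            rw [← pvMap_w_space r2]
            simp
          · rw [if_neg hsp]
            rw [ih r (by simp at hlen hr_len ⊢; omega) _]
            simp

-- ===== VERDICT (by name: the statement is the Claim_ definition above) =====
theorem parse_look_result_spec : Claim_equal_parse_look_result := by
  intro result _
  unfold Spec_parse_look_result parse_look_result parse_look_result_alt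
  rw [pvSplitOn_eq]
  exact pvGoA_eq _ _ (Nat.le_refl _) []
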